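-- pv_equiv track=rewrite | github.com/legalchik/course-of-innopolis | strings-and-methods/2.py | foo
-- ===== SOURCE A (Python) =====
-- def foo(s):
-- 	Sum = sum(s)
--
-- 	Sum2 = 0
-- 	for el in s:
-- 		if el%2 == 0:
-- 			Sum2 += el
--
-- 	diff = max(s) - min(s)
--
-- 	return Sum, Sum2, diff
-- ===== SOURCE B (Python) =====
-- def foo(s):
--     it = iter(s)
--     try:
--         first = next(it)
--     except StopIteration:
--         raise ValueError("max() arg is an empty sequence")
--     total = first
--     even_total = first if first % 2 == 0 else 0
--     cur_max = cur_min = first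
--     for el in it:
--         total += el
--         if el % 2 == 0:
--             even_total += el
--         if el > cur_max:
--             cur_max = el
--         if el < cur_min:
--             cur_min = el
--     return total, even_total, cur_max - cur_min
-- ===== Notes on version B (the rewrite author's own statement) =====
-- stated objective: alternative
-- what changed: replaces A's four separate passes (sum, even-sum loop, max, min) with one loop that maintains total, even total and running max/min seeded from the first element
import Mathlib
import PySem

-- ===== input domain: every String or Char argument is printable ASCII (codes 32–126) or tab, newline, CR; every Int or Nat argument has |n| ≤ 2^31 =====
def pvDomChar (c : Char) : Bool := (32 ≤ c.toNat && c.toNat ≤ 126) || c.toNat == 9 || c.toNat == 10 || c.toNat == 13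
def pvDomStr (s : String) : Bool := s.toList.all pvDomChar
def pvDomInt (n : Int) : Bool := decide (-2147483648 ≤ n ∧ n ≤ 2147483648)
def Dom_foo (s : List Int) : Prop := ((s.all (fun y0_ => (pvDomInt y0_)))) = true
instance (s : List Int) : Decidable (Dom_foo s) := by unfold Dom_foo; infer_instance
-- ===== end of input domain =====

-- B collapses A's four passes (sum, even-sum loop, max, min) into ONE loop seeded from the
-- first element; both raise ValueError on the empty list (excluded by Pre_foo).

-- ===== PORT A =====
-- Sum = sum(s); Sum2 = even-sum loop; diff = max(s) - min(s) (none on [] = ValueError, excluded by Pre_foo)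
def foo (s : List Int) : Int × Int × Int :=
  let Sum := s.foldl (· + ·) 0
  let Sum2 := s.foldl (fun acc el => if el % 2 = 0 then acc + el else acc) 0
  match PySem.List.max? s (fun x => x), PySem.List.min? s (fun x => x) with
  | some mx, some mn => (Sum, Sum2, mx - mn)
  | _, _ => (0, 0, 0)   -- unreachable under Pre_foo (max([])/min([]) raise ValueError)

-- ===== PORT B =====
def fooAltGo : List Int → Int → Int → Int → Int → Int × Int × Int
  | [], total, evenT, mx, mn => (total, evenT, mx - mn)
  | el :: rest, total, evenT, mx, mn =>
      fooAltGo rest (total + el) (if el % 2 = 0 then evenT + el else evenT)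
        (if el > mx then el else mx) (if el < mn then el else mn)

def foo_alt (s : List Int) : Int × Int × Int :=
  match s with
  | [] => (0, 0, 0)   -- unreachable under Pre_foo (B raises ValueError on [])
  | first :: rest =>
      fooAltGo rest first (if first % 2 = 0 then first else 0) first first

-- ===== PRECONDITION & SPEC =====
-- Pre_foo excludes the empty list, on which A's max([]) raises ValueError (B raises too).
def Pre_foo (s : List Int) : Prop := s ≠ []
instance (s : List Int) : Decidable (Pre_foo s) := by unfold Pre_foo; infer_instance
def pvWitness_foo : List Int := [3, -2, 7]

def Spec_foo (s : List Int) (out : Int × Int × Int) : Prop := out = foo_alt s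
instance (s : List Int) (out : Int × Int × Int) : Decidable (Spec_foo s out) := by unfold Spec_foo; infer_instance

-- ===== CLAIM (what is proved, stated in full; the proofs are below) =====
def Claim_equal_foo : Prop := ∀ (s : List Int), Dom_foo s → Pre_foo s → Spec_foo s (foo s)

-- ===== LEMMAS AND PROOFS =====
theorem fooAltGo_eq (t : List Int) : ∀ (total evenT mx mn : Int),
    fooAltGo t total evenT mx mn =
      (t.foldl (· + ·) total,
       t.foldl (fun acc el => if el % 2 = 0 then acc + el else acc) evenT,
       t.foldl max mx - t.foldl min mn) := by
  induction t with
  | nil => intro total evenT mx mn; rfl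
  | cons el rest ih =>
      intro total evenT mx mn
      simp only [fooAltGo, List.foldl_cons, ih]
      have hmax : (if el > mx then el else mx) = max mx el := by omega
      have hmin : (if el < mn then el else mn) = min mn el := by omega
      rw [hmax, hmin]

-- ===== VERDICT (by name: the statement is the Claim_ definition above) =====
theorem foo_spec : Claim_equal_foo := by
  intro s _ hpre
  match s with
  | [] => exact absurd rfl hpre
  | x :: t =>
      show foo (x :: t) = foo_alt (x :: t)
      simp only [foo, foo_alt, PySem.List.max?_id_cons, PySem.List.min?_id_cons,
        fooAltGo_eq, List.foldl_cons, Int.zero_add]
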